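-- pv_equiv track=rewrite | github.com/luhao007/WoW-Classic-Addons | instawow/utils.py | merge_intersecting_sets
-- ===== SOURCE A (Python) =====
-- from collections.abc import Awaitable, Callable, Iterable, Iterator, Mapping, Sequence
-- from typing import Generic, TypeVar, overload
--
-- _T = TypeVar('_T')
--
-- def merge_intersecting_sets(it: Iterable[frozenset[_T]]) -> Iterator[frozenset[_T]]:
--     "Recursively merge intersecting sets in a collection."
--     many_sets = list(it)
--     while many_sets:
--         this_set = many_sets.pop(0)
--         while True:
--             for idx, other_set in enumerate(many_sets):
--                 if not this_set.isdisjoint(other_set):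
--                     this_set |= many_sets.pop(idx)
--                     break
--             else:
--                 break
--         yield this_set
-- ===== SOURCE B (Python) =====
-- def merge_intersecting_sets(it):
--     "Recursively merge intersecting sets in a collection."
--     components = []
--     for s in it:
--         components = _add_set(components, frozenset(s))
--     return components
--
--
-- def _add_set(components, s):
--     """Fold one set into a list of pairwise-disjoint components in one sweep:
--     components not touching s are kept in order; all components touching s
--     are merged (together with s) into one, placed where the first of them was."""
--     prefix = []
--     rest = iter(components)
--     for c in rest:
--         if c.isdisjoint(s):
--             prefix.append(c)
--         else:
--             merged = s | c
--             suffix = []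
--             for d in rest:
--                 if d.isdisjoint(s):
--                     suffix.append(d)
--                 else:
--                     merged |= d
--             return prefix + [merged] + suffix
--     prefix.append(s)
--     return prefix
-- ===== Notes on version B (the rewrite author's own statement) =====
-- stated objective: alternative
-- what changed: A repeatedly pops the first set and grows it by rescanning the whole remainder from the start after every single merge; B is a single forward fold that maintains a list of pairwise-disjoint components and folds each incoming set into it in one sweep, merging every component the new set touches.
import Mathlib
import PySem

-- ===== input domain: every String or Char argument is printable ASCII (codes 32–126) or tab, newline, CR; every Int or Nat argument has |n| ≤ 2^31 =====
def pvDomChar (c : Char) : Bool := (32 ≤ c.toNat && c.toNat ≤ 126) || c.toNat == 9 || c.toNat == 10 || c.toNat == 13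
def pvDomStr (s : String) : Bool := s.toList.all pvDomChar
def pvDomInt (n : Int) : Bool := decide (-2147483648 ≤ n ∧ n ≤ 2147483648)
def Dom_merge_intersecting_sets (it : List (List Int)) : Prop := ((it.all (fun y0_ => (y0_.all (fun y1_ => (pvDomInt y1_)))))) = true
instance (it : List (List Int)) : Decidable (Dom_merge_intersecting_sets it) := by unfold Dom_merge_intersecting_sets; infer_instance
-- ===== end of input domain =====

-- B replaces A's pop-first/rescan-after-every-merge loop by a single forward fold that keeps
-- pairwise-disjoint components and folds each incoming set into them in one sweep (objective: alternative).
-- NOTE on side effects: when called with mutable sets, A's `this_set |= ...` mutates the caller's set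
-- objects in place while B never does; the equivalence proved here is about the RETURN value only.
-- Python frozensets are modelled as canonical (sorted, duplicate-free) lists; both ports share
-- this representation, so equality of the ports is equality of the lists of result sets.

-- set model shared by both ports: canonical representative of a Python frozenset
def canon (xs : List Int) : List Int := xs.dedup.mergeSort (· ≤ ·)

-- a.isdisjoint(b)
def sdisj (a b : List Int) : Bool := a.all (fun x => !(b.contains x))

-- a | b
def sunion (a b : List Int) : List Int := canon (a ++ b)

-- ===== PORT A =====
-- the inner `for idx, other_set in enumerate(many_sets): if not disjoint: merge, pop idx, break`
def findMerge (t : List Int) : List (List Int) → Option (List Int × List (List Int))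
  | [] => none
  | o :: rest =>
    if sdisj t o then (findMerge t rest).map (fun p => (p.1, o :: p.2))
    else some (sunion t o, rest)

theorem findMerge_some_length {t t' : List Int} : ∀ {L r' : List (List Int)},
    findMerge t L = some (t', r') → r'.length + 1 = L.length := by
  intro L
  induction L with
  | nil => intro r' h; simp [findMerge] at h
  | cons o rest ih =>
    intro r' h
    simp only [findMerge] at h
    split at h
    · cases hf : findMerge t rest with
      | none => rw [hf] at h; simp at h
      | some p =>
        rw [hf] at h
        simp only [Option.map_some] at h
        cases h
        have := ih (r' := p.2) (by rw [hf])
        simp [← this]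
    · cases h; simp

-- the `while True: … else: break` saturation loop of A
def absorb (t : List Int) (rest : List (List Int)) : List Int × List (List Int) :=
  match h : findMerge t rest with
  | none => (t, rest)
  | some (t', r') => absorb t' r'
termination_by rest.length
decreasing_by have := findMerge_some_length h; omega

theorem absorb_of_none {t : List Int} {rest : List (List Int)}
    (h : findMerge t rest = none) : absorb t rest = (t, rest) := by
  rw [absorb]; split <;> simp_all

theorem absorb_of_some {t t' : List Int} {rest r' : List (List Int)}
    (h : findMerge t rest = some (t', r')) : absorb t rest = absorb t' r' := by
  rw [absorb]; split <;> simp_all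

theorem absorb_snd_length_le : ∀ (rest : List (List Int)) (t : List Int),
    (absorb t rest).2.length ≤ rest.length := by
  intro rest t
  induction t, rest using absorb.induct with
  | case1 t rest h => rw [absorb_of_none h]
  | case2 t rest t' r' h ih =>
    rw [absorb_of_some h]
    have := findMerge_some_length h
    omega

-- the outer `while many_sets: this_set = many_sets.pop(0); …; yield this_set`
def mergeSets : List (List Int) → List (List Int)
  | [] => []
  | x :: rest =>
    (absorb x rest).1 :: mergeSets (absorb x rest).2
termination_by L => L.length
decreasing_by have := absorb_snd_length_le rest x; simp; omega

def merge_intersecting_sets (it : List (List Int)) : List (List Int) :=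
  mergeSets (it.map canon)

-- ===== PORT B =====
-- inner `for d in rest:` sweep after the first intersecting component was found
def absorbRest (s m : List Int) : List (List Int) → List Int × List (List Int)
  | [] => (m, [])
  | d :: cs =>
    if sdisj d s then
      ((absorbRest s m cs).1, d :: (absorbRest s m cs).2)
    else
      absorbRest s (sunion m d) cs

-- _add_set: prefix of untouched components, then one sweep merging everything touching s
def addSet (comps : List (List Int)) (s : List Int) : List (List Int) :=
  match comps with
  | [] => [s]
  | c :: cs =>
    if sdisj c s then c :: addSet cs s
    else (absorbRest s (sunion s c) cs).1 :: (absorbRest s (sunion s c) cs).2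

def merge_intersecting_sets_alt (it : List (List Int)) : List (List Int) :=
  it.foldl (fun comps s => addSet comps (canon s)) []

-- ===== PRECONDITION & SPEC =====
def Spec_merge_intersecting_sets (it : List (List Int)) (out : List (List Int)) : Prop := out = merge_intersecting_sets_alt it
instance (it : List (List Int)) (out : List (List Int)) : Decidable (Spec_merge_intersecting_sets it out) := by unfold Spec_merge_intersecting_sets; infer_instance

-- ===== CLAIM (what is proved, stated in full; the proofs are below) =====
def Claim_equal_merge_intersecting_sets : Prop := ∀ (it : List (List Int)), Dom_merge_intersecting_sets it → Spec_merge_intersecting_sets it (merge_intersecting_sets it)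

-- ===== LEMMAS AND PROOFS =====

theorem findMerge_none_iff {t : List Int} : ∀ {L : List (List Int)},
    findMerge t L = none ↔ ∀ d ∈ L, sdisj t d = true := by
  intro L
  induction L with
  | nil => simp [findMerge]
  | cons o rest ih =>
    simp only [findMerge]
    split
    · cases hf : findMerge t rest <;> simp_all
    · simp_all

theorem findMerge_some_spec {t t' : List Int} : ∀ {L r' : List (List Int)},
    findMerge t L = some (t', r') →
    ∃ L1 o L2, L = L1 ++ o :: L2 ∧ (∀ d ∈ L1, sdisj t d = true) ∧ sdisj t o = false ∧
      t' = sunion t o ∧ r' = L1 ++ L2 := by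
  intro L
  induction L with
  | nil => intro r' h; simp [findMerge] at h
  | cons o rest ih =>
    intro r' h
    simp only [findMerge] at h
    split at h
    · cases hf : findMerge t rest with
      | none => rw [hf] at h; simp at h
      | some p =>
        rw [hf] at h
        simp only [Option.map_some] at h
        cases h
        obtain ⟨L1, o', L2, rfl, h1, h2, h3, h4⟩ := ih (r' := p.2) (by rw [hf])
        refine ⟨o :: L1, o', L2, rfl, ?_, h2, h3, by simp [h4]⟩
        intro d hd
        rcases List.mem_cons.mp hd with rfl | hd
        · assumption
        · exact h1 d hd
    · cases h
      exact ⟨[], o, rest, rfl, by simp, by simp_all, rfl, rfl⟩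


-- ---- basic facts about the set model ----
theorem mem_canon {x : Int} {l : List Int} : x ∈ canon l ↔ x ∈ l := by
  unfold canon
  rw [(List.mergeSort_perm l.dedup _).mem_iff, List.mem_dedup]

theorem canon_eq_of_setEq {a b : List Int} (h : ∀ x, x ∈ a ↔ x ∈ b) : canon a = canon b := by
  apply List.Perm.eq_of_pairwise (le := (· ≤ ·))
  · intro x y _ _ hxy hyx; exact le_antisymm hxy hyx
  · exact List.pairwise_mergeSort' _ _
  · exact List.pairwise_mergeSort' _ _
  · apply (List.perm_ext_iff_of_nodup ?_ ?_).mpr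
    · intro x; rw [mem_canon, mem_canon]; exact h x
    · exact (List.mergeSort_perm _ _).nodup_iff.mpr (List.nodup_dedup a)
    · exact (List.mergeSort_perm _ _).nodup_iff.mpr (List.nodup_dedup b)

def Canon (l : List Int) : Prop := canon l = l

theorem canon_canon (l : List Int) : Canon (canon l) :=
  canon_eq_of_setEq (fun _ => mem_canon)

theorem canon_sunion (a b : List Int) : Canon (sunion a b) := canon_canon _

theorem canon_ext {a b : List Int} (ha : Canon a) (hb : Canon b)
    (h : ∀ x, x ∈ a ↔ x ∈ b) : a = b := by
  rw [← ha, ← hb]; exact canon_eq_of_setEq h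

theorem mem_sunion {x : Int} {a b : List Int} : x ∈ sunion a b ↔ x ∈ a ∨ x ∈ b := by
  unfold sunion; rw [mem_canon, List.mem_append]

theorem sdisj_iff {a b : List Int} : sdisj a b = true ↔ ∀ x ∈ a, x ∉ b := by
  simp [sdisj]

theorem sdisj_false_iff {a b : List Int} : sdisj a b = false ↔ ∃ x, x ∈ a ∧ x ∈ b := by
  rw [← Bool.not_eq_true, sdisj_iff]; push_neg; simp
theorem sdisj_comm {a b : List Int} : sdisj a b = sdisj b a := by
  cases hb : sdisj b a
  · rw [sdisj_false_iff] at hb ⊢; obtain ⟨x, h1, h2⟩ := hb; exact ⟨x, h2, h1⟩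
  · rw [sdisj_iff] at hb ⊢; intro x hx hxb; exact hb x hxb hx

-- ---- element connectivity ----
def econnRel (M : List (List Int)) (a b : Int) : Prop := ∃ d, d ∈ M ∧ a ∈ d ∧ b ∈ d

def EConn (M : List (List Int)) : Int → Int → Prop := Relation.ReflTransGen (econnRel M)

theorem econn_congr {M M' : List (List Int)} (h : ∀ d, d ∈ M → d ∈ M') {a b : Int}
    (hc : EConn M a b) : EConn M' a b := by
  exact Relation.ReflTransGen.mono (fun x y hxy => by
    obtain ⟨d, hd, h1, h2⟩ := hxy; exact ⟨d, h d hd, h1, h2⟩) hc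

theorem econn_symm {M : List (List Int)} {a b : Int} (h : EConn M a b) : EConn M b a := by
  induction h with
  | refl => exact Relation.ReflTransGen.refl
  | tail _ hr ih =>
    obtain ⟨d, hd, h1, h2⟩ := hr
    exact Relation.ReflTransGen.trans (Relation.ReflTransGen.single ⟨d, hd, h2, h1⟩) ih

-- merging two intersecting member sets does not change element connectivity
theorem econn_merge {a b : List Int} {R : List (List Int)} (hab : sdisj a b = false) :
    ∀ {x y : Int}, EConn (sunion a b :: R) x y ↔ EConn (a :: b :: R) x y := by
  obtain ⟨w, hwa, hwb⟩ := sdisj_false_iff.mp hab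
  intro x y
  constructor
  · intro h
    induction h with
    | refl => exact Relation.ReflTransGen.refl
    | tail _ hr ih =>
      obtain ⟨d, hd, h1, h2⟩ := hr
      rcases List.mem_cons.mp hd with rfl | hdR
      · rcases mem_sunion.mp h1 with h1a | h1b <;> rcases mem_sunion.mp h2 with h2a | h2b
        · exact ih.tail ⟨a, by simp, h1a, h2a⟩
        · exact (ih.tail ⟨a, by simp, h1a, hwa⟩).tail ⟨b, by simp, hwb, h2b⟩
        · exact (ih.tail ⟨b, by simp, h1b, hwb⟩).tail ⟨a, by simp, hwa, h2a⟩
        · exact ih.tail ⟨b, by simp, h1b, h2b⟩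
      · exact ih.tail ⟨d, by simp [hdR], h1, h2⟩
  · intro h
    induction h with
    | refl => exact Relation.ReflTransGen.refl
    | tail _ hr ih =>
      obtain ⟨d, hd, h1, h2⟩ := hr
      rcases List.mem_cons.mp hd with heq | hd'
      · exact ih.tail ⟨sunion a b, by simp, mem_sunion.mpr (Or.inl (heq ▸ h1)),
          mem_sunion.mpr (Or.inl (heq ▸ h2))⟩
      · rcases List.mem_cons.mp hd' with heq | hdR
        · exact ih.tail ⟨sunion a b, by simp, mem_sunion.mpr (Or.inr (heq ▸ h1)),
            mem_sunion.mpr (Or.inr (heq ▸ h2))⟩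
        · exact ih.tail ⟨d, by simp [hdR], h1, h2⟩

-- ---- characterization of A's absorb ----
theorem absorb_seed_mem : ∀ (L : List (List Int)) (t : List Int) (z : Int),
    z ∈ t → z ∈ (absorb t L).1 := by
  intro L t
  induction t, L using absorb.induct with
  | case1 t L h => intro z hz; rw [absorb_of_none h]; exact hz
  | case2 t L t' r' h ih =>
    intro z hz
    rw [absorb_of_some h]
    obtain ⟨L1, o, L2, rfl, _, _, rfl, rfl⟩ := findMerge_some_spec h
    exact ih z (mem_sunion.mpr (Or.inl hz))

theorem absorb_elems : ∀ (L : List (List Int)) (t : List Int) (z : Int),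
    z ∈ (absorb t L).1 ↔ ∃ y ∈ t, EConn (t :: L) y z := by
  intro L t
  induction t, L using absorb.induct with
  | case1 t L h =>
    intro z
    rw [absorb_of_none h]
    have hall := findMerge_none_iff.mp h
    constructor
    · intro hz; exact ⟨z, hz, Relation.ReflTransGen.refl⟩
    · rintro ⟨y, hy, hc⟩
      induction hc with
      | refl => exact hy
      | tail _ hr ih =>
        have hmid := ih
        obtain ⟨d, hd, h1, h2⟩ := hr
        rcases List.mem_cons.mp hd with rfl | hdL
        · exact h2
        · exact absurd (sdisj_iff.mp (hall d hdL) _ hmid) (by simp [h1])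
  | case2 t L t' r' h ih =>
    intro z
    rw [absorb_of_some h]
    obtain ⟨L1, o, L2, rfl, hL1, hto, rfl, rfl⟩ := findMerge_some_spec h
    rw [ih z]
    obtain ⟨w, hwt, hwo⟩ := sdisj_false_iff.mp hto
    have hmemEq : ∀ {p q : Int}, EConn (t :: L1 ++ o :: L2) p q ↔ EConn (t :: o :: L1 ++ L2) p q := by
      intro p q
      constructor <;> intro hh <;> refine econn_congr ?_ hh <;> intro d hd <;>
        simp only [List.mem_cons, List.mem_append] at hd ⊢ <;> tauto
    constructor
    · rintro ⟨y, hy, hc⟩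
      have hc' : EConn (t :: o :: L1 ++ L2) y z := (econn_merge hto).mp hc
      rcases mem_sunion.mp hy with hyt | hyo
      · exact ⟨y, hyt, hmemEq.mpr hc'⟩
      · refine ⟨w, hwt, hmemEq.mpr (Relation.ReflTransGen.trans
          (Relation.ReflTransGen.single ⟨o, by simp, hwo, hyo⟩) hc')⟩
    · rintro ⟨y, hy, hc⟩
      exact ⟨y, mem_sunion.mpr (Or.inl hy), (econn_merge hto).mpr (hmemEq.mp hc)⟩

theorem absorb_snd_eq_filter : ∀ (L : List (List Int)) (t : List Int),
    (absorb t L).2 = L.filter (fun d => sdisj d (absorb t L).1) := by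
  intro L t
  induction t, L using absorb.induct with
  | case1 t L h =>
    rw [absorb_of_none h]
    have hall := findMerge_none_iff.mp h
    refine (List.filter_eq_self.mpr ?_).symm
    intro d hd
    rw [sdisj_comm]
    exact hall d hd
  | case2 t L t' r' h ih =>
    rw [absorb_of_some h]
    obtain ⟨L1, o, L2, rfl, hL1, hto, rfl, rfl⟩ := findMerge_some_spec h
    rw [ih]
    have hoT : sdisj o (absorb (sunion t o) (L1 ++ L2)).1 = false := by
      obtain ⟨w, hwt, hwo⟩ := sdisj_false_iff.mp hto
      exact sdisj_false_iff.mpr ⟨w, hwo,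
        absorb_seed_mem _ _ _ (mem_sunion.mpr (Or.inl hwt))⟩
    simp [List.filter_append, hoT]

theorem absorb_canon : ∀ (L : List (List Int)) (t : List Int), Canon t → Canon (absorb t L).1 := by
  intro L t
  induction t, L using absorb.induct with
  | case1 t L h => intro ht; rw [absorb_of_none h]; exact ht
  | case2 t L t' r' h ih =>
    intro _
    rw [absorb_of_some h]
    obtain ⟨L1, o, L2, rfl, _, _, rfl, rfl⟩ := findMerge_some_spec h
    exact ih (canon_sunion _ _)

-- saturation: a remaining-or-any list member intersecting the closure is inside it
theorem absorb_sat : ∀ (L : List (List Int)) (t : List Int) {d : List Int}, d ∈ L →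
    sdisj d (absorb t L).1 = false → ∀ x ∈ d, x ∈ (absorb t L).1 := by
  intro L t d hd hdisj x hx
  rw [absorb_elems]
  obtain ⟨y, hyd, hyT⟩ := sdisj_false_iff.mp hdisj
  rw [absorb_elems] at hyT
  obtain ⟨a, ha, hconn⟩ := hyT
  exact ⟨a, ha, Relation.ReflTransGen.tail hconn ⟨d, List.mem_cons_of_mem _ hd, hyd, hx⟩⟩

theorem mergeSets_cons (x : List Int) (rest : List (List Int)) :
    mergeSets (x :: rest) = (absorb x rest).1 :: mergeSets (absorb x rest).2 := by
  rw [mergeSets]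

-- ---- structure of mergeSets' components ----
-- every element of a component comes from some input set
theorem comp_elems_sub : ∀ (L : List (List Int)) {c : List Int}, c ∈ mergeSets L →
    ∀ x ∈ c, ∃ d ∈ L, x ∈ d := by
  intro L
  induction L using mergeSets.induct with
  | case1 => intro c hc; simp [mergeSets] at hc
  | case2 x rest ih =>
    intro c hc x0 hx0
    rw [mergeSets_cons] at hc
    rcases List.mem_cons.mp hc with rfl | hc'
    · have := (absorb_elems rest x x0).mp hx0
      obtain ⟨y, hy, hconn⟩ := this
      rcases (Relation.reflTransGen_swap.mp hconn).cases_head with heq | ⟨mid, hr, _⟩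
      · exact ⟨x, by simp, heq ▸ hy⟩
      · obtain ⟨d, hd, h1, h2⟩ := hr
        exact ⟨d, hd, h2⟩
    · obtain ⟨d, hd, hx⟩ := ih hc' x0 hx0
      rw [absorb_snd_eq_filter] at hd
      exact ⟨d, List.mem_cons_of_mem _ (List.mem_filter.mp hd).1, hx⟩

-- every input set is contained in some component
theorem comp_cover : ∀ (L : List (List Int)) {d : List Int}, d ∈ L →
    ∃ c ∈ mergeSets L, ∀ x ∈ d, x ∈ c := by
  intro L
  induction L using mergeSets.induct with
  | case1 => intro d hd; simp at hd
  | case2 x rest ih =>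
    intro d hd
    rw [mergeSets_cons]
    rcases List.mem_cons.mp hd with rfl | hd'
    · exact ⟨(absorb d rest).1, by simp, fun z hz => absorb_seed_mem _ _ _ hz⟩
    · cases hdisj : sdisj d (absorb x rest).1 with
      | false => exact ⟨(absorb x rest).1, by simp, absorb_sat rest x hd' hdisj⟩
      | true =>
        have hdR : d ∈ (absorb x rest).2 := by
          rw [absorb_snd_eq_filter]; exact List.mem_filter.mpr ⟨hd', hdisj⟩
        obtain ⟨c, hc, hsub⟩ := ih hdR
        exact ⟨c, List.mem_cons_of_mem _ hc, hsub⟩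

-- components absorb any input set they touch
-- elements of later components avoid the first closure
theorem comp_tail_avoid {x : List Int} {rest : List (List Int)} {c : List Int}
    (hc : c ∈ mergeSets (absorb x rest).2) : ∀ z ∈ c, z ∉ (absorb x rest).1 := by
  intro z hz hzT
  obtain ⟨d, hd, hzd⟩ := comp_elems_sub _ hc z hz
  rw [absorb_snd_eq_filter] at hd
  have := (List.mem_filter.mp hd).2
  exact absurd (sdisj_iff.mp (by simpa using this) z hzd) (by simp [hzT])

theorem comp_sat : ∀ (L : List (List Int)) {c : List Int}, c ∈ mergeSets L →
    ∀ {d : List Int}, d ∈ L → sdisj d c = false → ∀ x ∈ d, x ∈ c := by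
  intro L
  induction L using mergeSets.induct with
  | case1 => intro c hc; simp [mergeSets] at hc
  | case2 x rest ih =>
    intro c hc d hd hdisj
    rw [mergeSets_cons] at hc
    rcases List.mem_cons.mp hc with rfl | hc'
    · rcases List.mem_cons.mp hd with rfl | hd'
      · exact fun z hz => absorb_seed_mem _ _ _ hz
      · exact absorb_sat rest x hd' hdisj
    · obtain ⟨w, hwd, hwc⟩ := sdisj_false_iff.mp hdisj
      cases hdisj2 : sdisj d (absorb x rest).1 with
      | false =>
        have hsub : ∀ z ∈ d, z ∈ (absorb x rest).1 := by
          rcases List.mem_cons.mp hd with rfl | hd'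
          · exact fun z hz => absorb_seed_mem _ _ _ hz
          · exact absorb_sat rest x hd' hdisj2
        exact absurd (hsub w hwd) (comp_tail_avoid hc' w hwc)
      | true =>
        have hd' : d ∈ rest := by
          rcases List.mem_cons.mp hd with heq | hd'
          · exact absurd (absorb_seed_mem rest x w (heq ▸ hwd)) (sdisj_iff.mp hdisj2 w hwd)
          · exact hd'
        exact ih hc' (by rw [absorb_snd_eq_filter]; exact List.mem_filter.mpr ⟨hd', hdisj2⟩) hdisj

-- elements of one component are mutually connected
theorem comp_conn : ∀ (L : List (List Int)),
    ∀ {c : List Int}, c ∈ mergeSets L → ∀ {y z : Int}, y ∈ c → z ∈ c → EConn L y z := by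
  intro L
  induction L using mergeSets.induct with
  | case1 => intro c hc; simp [mergeSets] at hc
  | case2 x rest ih =>
    intro c hc y z hy hz
    rw [mergeSets_cons] at hc
    rcases List.mem_cons.mp hc with rfl | hc'
    · obtain ⟨a, ha, hconn⟩ := (absorb_elems rest x y).mp hy
      obtain ⟨a', ha', hconn'⟩ := (absorb_elems rest x z).mp hz
      exact Relation.ReflTransGen.trans (econn_symm hconn)
        (Relation.ReflTransGen.trans (Relation.ReflTransGen.single ⟨x, by simp, ha, ha'⟩) hconn')
    · refine econn_congr ?_ (ih hc' hy hz)
      intro d hd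
      rw [absorb_snd_eq_filter] at hd
      exact List.mem_cons_of_mem _ (List.mem_filter.mp hd).1

-- distinct components are disjoint (stated on list positions via Pairwise)
theorem comp_pairwise : ∀ (L : List (List Int)),
    (mergeSets L).Pairwise (fun a b => sdisj a b = true) := by
  intro L
  induction L using mergeSets.induct with
  | case1 => simp [mergeSets]
  | case2 x rest ih =>
    rw [mergeSets_cons]
    refine List.Pairwise.cons ?_ ih
    intro c hc
    rw [sdisj_iff]
    intro z hzT hzc
    exact comp_tail_avoid hc z hzc hzT

-- ---- commuting a saturated filter with mergeSets ----
theorem findMerge_of_prefix {t o : List Int} {L2 : List (List Int)} (hto : sdisj t o = false) :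
    ∀ (L1 : List (List Int)), (∀ d ∈ L1, sdisj t d = true) →
    findMerge t (L1 ++ o :: L2) = some (sunion t o, L1 ++ L2) := by
  intro L1
  induction L1 with
  | nil => intro _; simp [findMerge, hto]
  | cons a L1 ih =>
    intro h
    have ha := h a (by simp)
    simp only [List.cons_append, findMerge, ha, if_true]
    rw [ih (fun d hd => h d (List.mem_cons_of_mem _ hd))]
    rfl

-- absorption from a seed disjoint from u never touches the sets inside u
theorem absorb_filter {u : List Int} : ∀ (L : List (List Int)) (t : List Int),
    sdisj t u = true → (∀ d ∈ L, sdisj d u = true ∨ ∀ x ∈ d, x ∈ u) →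
    absorb t (L.filter (fun d => sdisj d u)) = ((absorb t L).1, (absorb t L).2.filter (fun d => sdisj d u))
      ∧ sdisj (absorb t L).1 u = true := by
  intro L t
  induction t, L using absorb.induct with
  | case1 t L h =>
    intro htu hsat
    rw [absorb_of_none h]
    have hall := findMerge_none_iff.mp h
    have hnone : findMerge t (L.filter (fun d => sdisj d u)) = none :=
      findMerge_none_iff.mpr (fun d hd => hall d (List.mem_filter.mp hd).1)
    rw [absorb_of_none hnone]
    exact ⟨rfl, htu⟩
  | case2 t L t' r' h ih =>
    intro htu hsat
    rw [absorb_of_some h]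
    obtain ⟨L1, o, L2, rfl, hL1, hto, rfl, rfl⟩ := findMerge_some_spec h
    have hou : sdisj o u = true := by
      rcases hsat o (by simp) with h' | h'
      · exact h'
      · obtain ⟨w, hwt, hwo⟩ := sdisj_false_iff.mp hto
        exact absurd (sdisj_iff.mp htu w hwt) (by simp [h' w hwo])
    have ht'u : sdisj (sunion t o) u = true := by
      rw [sdisj_iff]
      intro z hz
      rcases mem_sunion.mp hz with hzt | hzo
      · exact sdisj_iff.mp htu z hzt
      · exact sdisj_iff.mp hou z hzo
    have hfilt : (L1 ++ o :: L2).filter (fun d => sdisj d u) =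
        L1.filter (fun d => sdisj d u) ++ o :: L2.filter (fun d => sdisj d u) := by
      simp [List.filter_append, hou]
    have hfm : findMerge t ((L1 ++ o :: L2).filter (fun d => sdisj d u)) =
        some (sunion t o, (L1 ++ L2).filter (fun d => sdisj d u)) := by
      rw [hfilt, findMerge_of_prefix hto _ (fun d hd => hL1 d (List.mem_filter.mp hd).1)]
      simp [List.filter_append]
    obtain ⟨ih1, ih2⟩ := ih ht'u (fun d hd => hsat d (by
      rcases List.mem_append.mp hd with h' | h'
      · exact List.mem_append.mpr (Or.inl h')
      · exact List.mem_append.mpr (Or.inr (List.mem_cons_of_mem _ h'))))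
    exact ⟨by rw [absorb_of_some hfm, ih1], ih2⟩

-- elements absorbed from a seed inside u stay inside u
theorem absorb_sub_u {u : List Int} : ∀ (L : List (List Int)) (t : List Int),
    (∀ z ∈ t, z ∈ u) → (∀ d ∈ L, sdisj d u = true ∨ ∀ x ∈ d, x ∈ u) →
    ∀ z ∈ (absorb t L).1, z ∈ u := by
  intro L t
  induction t, L using absorb.induct with
  | case1 t L h => intro htu _ z hz; rw [absorb_of_none h] at hz; exact htu z hz
  | case2 t L t' r' h ih =>
    intro htu hsat z hz
    rw [absorb_of_some h] at hz
    obtain ⟨L1, o, L2, rfl, hL1, hto, rfl, rfl⟩ := findMerge_some_spec h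
    have hou : ∀ x ∈ o, x ∈ u := by
      rcases hsat o (by simp) with h' | h'
      · obtain ⟨w, hwt, hwo⟩ := sdisj_false_iff.mp hto
        exact absurd (htu w hwt) (by simp [sdisj_iff.mp h' w hwo])
      · exact h'
    refine ih ?_ (fun d hd => hsat d (by
      rcases List.mem_append.mp hd with h' | h'
      · exact List.mem_append.mpr (Or.inl h')
      · exact List.mem_append.mpr (Or.inr (List.mem_cons_of_mem _ h')))) z hz
    intro w hw
    rcases mem_sunion.mp hw with hwt | hwo
    · exact htu w hwt
    · exact hou w hwo

theorem rem_lemma : ∀ (L : List (List Int)) (u : List Int),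
    (∀ d ∈ L, sdisj d u = true ∨ ∀ x ∈ d, x ∈ u) →
    mergeSets (L.filter (fun d => sdisj d u)) = (mergeSets L).filter (fun c => sdisj c u) := by
  intro L
  induction L using mergeSets.induct with
  | case1 => intro u _; simp [mergeSets]
  | case2 x rest ih =>
    intro u hsat
    have hsat' : ∀ d ∈ (absorb x rest).2, sdisj d u = true ∨ ∀ z ∈ d, z ∈ u := by
      intro d hd
      rw [absorb_snd_eq_filter] at hd
      exact hsat d (List.mem_cons_of_mem _ (List.mem_filter.mp hd).1)
    have hsatr : ∀ d ∈ rest, sdisj d u = true ∨ ∀ z ∈ d, z ∈ u :=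
      fun d hd => hsat d (List.mem_cons_of_mem _ hd)
    cases hxu : sdisj x u with
    | true =>
      obtain ⟨habs, hTu⟩ := absorb_filter rest x hxu hsatr
      rw [List.filter_cons_of_pos (by simp [hxu]), mergeSets_cons, habs]
      dsimp only
      rw [ih u hsat', mergeSets_cons, List.filter_cons_of_pos (by simp [hTu])]
    | false =>
      -- x lies inside u, hence so does its whole component
      have hxsub : ∀ z ∈ x, z ∈ u := by
        rcases hsat x (by simp) with h' | h'
        · rw [h'] at hxu; cases hxu
        · exact h'
      have hTsub : ∀ z ∈ (absorb x rest).1, z ∈ u := absorb_sub_u rest x hxsub hsatr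
      have hTu : sdisj (absorb x rest).1 u = false := by
        obtain ⟨w, hwx, hwu⟩ := sdisj_false_iff.mp hxu
        exact sdisj_false_iff.mpr ⟨w, absorb_seed_mem _ _ _ hwx, hwu⟩
      have hrfilt : rest.filter (fun d => sdisj d u) =
          (absorb x rest).2.filter (fun d => sdisj d u) := by
        rw [absorb_snd_eq_filter, List.filter_filter]
        refine (List.filter_congr ?_).symm
        intro d _
        cases hdu : sdisj d u with
        | false => simp
        | true =>
          have : sdisj d (absorb x rest).1 = true := by
            rw [sdisj_iff]
            intro z hzd hzT
            exact absurd (sdisj_iff.mp hdu z hzd) (by simp [hTsub z hzT])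
          simp [this]
      rw [List.filter_cons_of_neg (by simp [hxu]), mergeSets_cons,
        List.filter_cons_of_neg (by simp [hTu]), hrfilt, ih u hsat']

-- ---- appending one set to the input ----
theorem findMerge_append (t s : List Int) : ∀ (r : List (List Int)),
    findMerge t (r ++ [s]) = match findMerge t r with
      | some (t', r') => some (t', r' ++ [s])
      | none => if sdisj t s then none else some (sunion t s, r) := by
  intro r
  induction r with
  | nil => simp [findMerge]
  | cons o r ih =>
    simp only [List.cons_append, findMerge]
    cases ho : sdisj t o with
    | true =>
      simp only [if_true, ih]
      cases hf : findMerge t r with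
      | none => simp; split <;> simp
      | some p => simp
    | false => simp

theorem absorb_append (t s : List Int) (r : List (List Int)) :
    absorb t (r ++ [s]) =
      if sdisj (absorb t r).1 s then ((absorb t r).1, (absorb t r).2 ++ [s])
      else absorb (sunion (absorb t r).1 s) (absorb t r).2 := by
  induction t, r using absorb.induct with
  | case1 t r h =>
    rw [absorb_of_none h]
    have := findMerge_append t s r
    rw [h] at this
    cases hts : sdisj t s with
    | true => rw [if_pos rfl]; rw [hts] at this; simp at this; rw [absorb_of_none this]
    | false => rw [if_neg (by simp)]; rw [hts] at this; simp at this; rw [absorb_of_some this]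
  | case2 t r t' r' h ih =>
    rw [absorb_of_some h]
    have := findMerge_append t s r
    rw [h] at this
    simp only at this
    rw [absorb_of_some this]
    exact ih

-- ---- characterization of B's sweep ----
theorem absorbRest_fst_elems (s : List Int) : ∀ (K : List (List Int)) (m : List Int) (x : Int),
    x ∈ (absorbRest s m K).1 ↔ x ∈ m ∨ ∃ d ∈ K, sdisj d s = false ∧ x ∈ d := by
  intro K
  induction K with
  | nil => intro m x; simp [absorbRest]
  | cons c cs ih =>
    intro m x
    simp only [absorbRest]
    cases hcs : sdisj c s with
    | true =>
      simp only [if_true, ih]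
      constructor
      · rintro (h | ⟨d, hd, h1, h2⟩)
        · exact Or.inl h
        · exact Or.inr ⟨d, List.mem_cons_of_mem _ hd, h1, h2⟩
      · rintro (h | ⟨d, hd, h1, h2⟩)
        · exact Or.inl h
        · rcases List.mem_cons.mp hd with rfl | hd'
          · rw [hcs] at h1; cases h1
          · exact Or.inr ⟨d, hd', h1, h2⟩
    | false =>
      simp only [if_neg (by simp : ¬ (false = true)), ih, mem_sunion]
      constructor
      · rintro ((h | h) | ⟨d, hd, h1, h2⟩)
        · exact Or.inl h
        · exact Or.inr ⟨c, by simp, hcs, h⟩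
        · exact Or.inr ⟨d, List.mem_cons_of_mem _ hd, h1, h2⟩
      · rintro (h | ⟨d, hd, h1, h2⟩)
        · exact Or.inl (Or.inl h)
        · rcases List.mem_cons.mp hd with rfl | hd'
          · exact Or.inl (Or.inr h2)
          · exact Or.inr ⟨d, hd', h1, h2⟩

theorem absorbRest_snd (s : List Int) : ∀ (K : List (List Int)) (m : List Int),
    (absorbRest s m K).2 = K.filter (fun d => sdisj d s) := by
  intro K
  induction K with
  | nil => intro m; simp [absorbRest]
  | cons c cs ih =>
    intro m
    simp only [absorbRest]
    cases hcs : sdisj c s with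
    | true => simp [hcs, ih]
    | false => simp [hcs, ih]

theorem absorbRest_canon (s : List Int) : ∀ (K : List (List Int)) (m : List Int), Canon m →
    Canon (absorbRest s m K).1 := by
  intro K
  induction K with
  | nil => intro m hm; exact hm
  | cons c cs ih =>
    intro m hm
    simp only [absorbRest]
    cases hcs : sdisj c s with
    | true => simp only [if_true]; exact ih m hm
    | false =>
      simp only [if_neg (by simp : ¬ (false = true))]
      exact ih _ (canon_sunion _ _)

-- ---- the main snoc lemma ----
theorem main_snoc : ∀ (ms : List (List Int)) (s : List Int),
    mergeSets (ms ++ [s]) = addSet (mergeSets ms) s := by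
  intro ms
  induction ms using mergeSets.induct with
  | case1 =>
    intro s
    have h0 : findMerge s [] = none := rfl
    simp [mergeSets_cons, mergeSets, absorb_of_none h0, addSet]
  | case2 x rest ih =>
    intro s
    rw [List.cons_append, mergeSets_cons (x := x) (rest := rest ++ [s]),
      mergeSets_cons (x := x) (rest := rest), absorb_append]
    cases h : sdisj (absorb x rest).1 s with
    | true =>
      rw [if_pos rfl, addSet, if_pos h]
      dsimp only
      rw [← ih s]
    | false =>
      simp only [if_neg (by simp : ¬ (false = true))]
      rw [addSet, if_neg (by simp [h] : ¬ (sdisj (absorb x rest).1 s = true))]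
      -- abbreviations
      set T0 := (absorb x rest).1 with hT0
      set r0 := (absorb x rest).2 with hr0
      set K := mergeSets r0 with hK
      set u := sunion T0 s with hu
      set M := (absorbRest s (sunion s T0) K).1 with hM
      have hr0T0 : ∀ d ∈ r0, sdisj d T0 = true := by
        intro d hd
        rw [hr0, absorb_snd_eq_filter] at hd
        exact (List.mem_filter.mp hd).2
      have hcavoid : ∀ {c : List Int}, c ∈ K → ∀ z ∈ c, z ∉ T0 := by
        intro c hc z hz hzT
        obtain ⟨d, hd, hzd⟩ := comp_elems_sub _ hc z hz
        exact absurd (sdisj_iff.mp (hr0T0 d hd) z hzd) (by simp [hzT])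
      -- Claim 1: the two merged head components are equal
      have hclaim1 : (absorb u r0).1 = M := by
        refine canon_ext (absorb_canon r0 u (canon_sunion _ _))
          (absorbRest_canon s K _ (canon_sunion _ _)) ?_
        intro z
        rw [absorb_elems, absorbRest_fst_elems]
        constructor
        · rintro ⟨y, hy, hc⟩
          induction hc with
          | refl =>
            rcases mem_sunion.mp hy with hyT | hys
            · exact Or.inl (mem_sunion.mpr (Or.inr hyT))
            · exact Or.inl (mem_sunion.mpr (Or.inl hys))
          | tail _ hr ih2 =>
            obtain ⟨d, hd, h1, h2⟩ := hr
            rcases List.mem_cons.mp hd with rfl | hdr0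
            · rcases mem_sunion.mp h2 with hT | hs
              · exact Or.inl (mem_sunion.mpr (Or.inr hT))
              · exact Or.inl (mem_sunion.mpr (Or.inl hs))
            · rcases ih2 with hmid | ⟨c, hcK, hcs, hmidc⟩
              · rcases mem_sunion.mp hmid with hmids | hmidT
                · obtain ⟨c, hcK, hsub⟩ := comp_cover r0 hdr0
                  exact Or.inr ⟨c, hcK, sdisj_false_iff.mpr ⟨_, hsub _ h1, hmids⟩, hsub _ h2⟩
                · exact absurd (sdisj_iff.mp (hr0T0 d hdr0) _ h1) (by simp [hmidT])
              · have hsub := comp_sat r0 hcK hdr0 (sdisj_false_iff.mpr ⟨_, h1, hmidc⟩)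
                exact Or.inr ⟨c, hcK, hcs, hsub _ h2⟩
        · rintro (hz | ⟨c, hcK, hcs, hzc⟩)
          · refine ⟨z, ?_, Relation.ReflTransGen.refl⟩
            rcases mem_sunion.mp hz with hzs | hzT
            · exact mem_sunion.mpr (Or.inr hzs)
            · exact mem_sunion.mpr (Or.inl hzT)
          · obtain ⟨y, hyc, hys⟩ := sdisj_false_iff.mp hcs
            refine ⟨y, mem_sunion.mpr (Or.inr hys), ?_⟩
            exact econn_congr (fun d hd => List.mem_cons_of_mem _ hd) (comp_conn r0 hcK hyc hzc)
      -- Claim 2: the remaining components are equal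
      have hclaim2 : mergeSets ((absorb u r0).2) = (absorbRest s (sunion s T0) K).2 := by
        rw [absorbRest_snd, absorb_snd_eq_filter, hclaim1]
        have hsatM : ∀ d ∈ r0, sdisj d M = true ∨ ∀ z ∈ d, z ∈ M := by
          intro d hd
          cases hdM : sdisj d M with
          | true => exact Or.inl rfl
          | false =>
            rw [← hclaim1] at hdM ⊢
            exact Or.inr (absorb_sat r0 u hd hdM)
        rw [rem_lemma r0 M hsatM, ← hK]
        refine List.filter_congr ?_
        intro c hcK
        cases hcs : sdisj c s with
        | false =>
          obtain ⟨y, hyc, hys⟩ := sdisj_false_iff.mp hcs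
          refine sdisj_false_iff.mpr ⟨y, hyc, ?_⟩
          rw [hM, absorbRest_fst_elems]
          exact Or.inl (mem_sunion.mpr (Or.inl hys))
        | true =>
          rw [sdisj_iff]
          intro z hzc hzM
          rw [hM, absorbRest_fst_elems] at hzM
          rcases hzM with hz | ⟨c', hc'K, hc's, hzc'⟩
          · rcases mem_sunion.mp hz with hzs | hzT
            · exact absurd (sdisj_iff.mp hcs z hzc) (by simp [hzs])
            · exact hcavoid hcK z hzc hzT
          · by_cases hcc : c = c'
            · rw [hcc] at hcs; rw [hcs] at hc's; cases hc's
            · have hpw := (comp_pairwise r0).forall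
                (fun a b hab => by rw [sdisj_comm] at hab; exact hab) hcK hc'K hcc
              exact absurd (sdisj_iff.mp hpw z hzc) (by simp [hzc'])
      rw [hclaim1, hclaim2]

theorem top_equiv : ∀ (it : List (List Int)),
    mergeSets (it.map canon) = it.foldl (fun comps s => addSet comps (canon s)) [] := by
  intro it
  induction it using List.reverseRecOn with
  | nil => simp [mergeSets]
  | append_singleton it s ih =>
    rw [List.foldl_append, List.foldl_cons, List.foldl_nil, ← ih, List.map_append]
    exact main_snoc _ (canon s)

-- ===== VERDICT (by name: the statement is the Claim_ definition above) =====
theorem merge_intersecting_sets_spec : Claim_equal_merge_intersecting_sets := by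
  intro it _
  exact top_equiv it
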